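-- pv_equiv track=rewrite | github.com/danesolberg/algorithms | random_problems/codesignal/alternatingSort.py | alternatingSort
-- ===== SOURCE A (Python) =====
-- def alternatingSort(a):
--     if not a:
--         return True
--
--     prev = a[0]
--     for i in range(1,len(a)):
--         div, mod = divmod(i, 2)
--         if mod == 0:
--             cur = a[div]
--         else:
--             cur = a[-1 - div]
--         if cur < prev:
--             return False
--         prev = cur
--     return True
-- ===== SOURCE B (Python) =====
-- def alternatingSort(a):
--     # Materialize the front/back interleaving with two pointers,
--     # then check it is non-decreasing in a separate zip pass.
--     b = []
--     lo, hi = 0, len(a) - 1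
--     front = True
--     while lo <= hi:
--         if front:
--             b.append(a[lo])
--             lo += 1
--         else:
--             b.append(a[hi])
--             hi -= 1
--         front = not front
--     return all(not y < x for x, y in zip(b, b[1:]))
-- ===== Notes on version B (the rewrite author's own statement) =====
-- stated objective: alternative
-- what changed: B materializes the front/back interleaved sequence with two pointers and a toggle, then checks monotonicity in a separate zip pass, instead of A's single indexed loop computing each compared element on the fly by divmod index arithmetic.
import Mathlib
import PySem

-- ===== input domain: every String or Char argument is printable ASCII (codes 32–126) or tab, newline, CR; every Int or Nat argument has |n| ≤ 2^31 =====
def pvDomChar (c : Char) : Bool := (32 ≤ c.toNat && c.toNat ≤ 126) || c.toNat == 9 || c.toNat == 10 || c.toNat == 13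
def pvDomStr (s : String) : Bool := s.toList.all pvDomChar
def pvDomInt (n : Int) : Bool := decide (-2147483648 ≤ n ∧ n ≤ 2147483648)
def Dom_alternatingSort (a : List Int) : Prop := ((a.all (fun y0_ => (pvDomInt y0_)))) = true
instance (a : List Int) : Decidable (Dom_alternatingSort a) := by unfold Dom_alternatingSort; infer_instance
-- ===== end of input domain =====

-- B materializes the interleaved list and checks monotonicity in a second pass,
-- instead of A's single indexed loop with divmod index arithmetic; same results, similar cost.

-- ===== PORT A =====
-- the for-loop with early return, as a recursion on the loop counter i (i ≥ 1, so Nat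
-- division i/2, i%2 coincides with Python's divmod(i, 2))
def altLoop (a : List Int) (n : Nat) (i : Nat) (prev : Int) : Bool :=
  if _h : i < n then
    let dv := i / 2
    let md := i % 2
    -- a[dv] / a[-1 - dv]; indices are always in range here, getD 0 is never taken
    let cur := if md = 0 then (PySem.List.pyGet? a (dv : Int)).getD 0
               else (PySem.List.pyGet? a (-1 - (dv : Int))).getD 0
    if cur < prev then false else altLoop a n (i + 1) cur
  else true
termination_by n - i

def alternatingSort (a : List Int) : Bool :=
  if a = [] then true
  else altLoop a a.length 1 ((PySem.List.pyGet? a 0).getD 0)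

-- ===== PORT B =====
-- the while loop: two pointers lo/hi and a front/back toggle, appending to b
def build (a : List Int) (lo hi : Int) (front : Bool) : List Int :=
  if _h : lo ≤ hi then
    if front then (PySem.List.pyGet? a lo).getD 0 :: build a (lo + 1) hi false
    else (PySem.List.pyGet? a hi).getD 0 :: build a lo (hi - 1) true
  else []
termination_by (hi + 1 - lo).toNat
decreasing_by all_goals omega

def alternatingSort_alt (a : List Int) : Bool :=
  let b := build a 0 ((a.length : Int) - 1) true
  (b.zip b.tail).all (fun p => !(p.2 < p.1))

-- ===== PRECONDITION & SPEC =====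
def Spec_alternatingSort (a : List Int) (out : Bool) : Prop := out = alternatingSort_alt a
instance (a : List Int) (out : Bool) : Decidable (Spec_alternatingSort a out) := by unfold Spec_alternatingSort; infer_instance

-- ===== CLAIM (what is proved, stated in full; the proofs are below) =====
def Claim_equal_alternatingSort : Prop := ∀ (a : List Int), Dom_alternatingSort a → Spec_alternatingSort a (alternatingSort a)

-- ===== LEMMAS AND PROOFS =====

-- proof helper: the interleaved sequence, written as a structural recursion
def interleave (l : List Int) : List Int :=
  match l with
  | [] => []
  | x :: r => x :: interleave r.reverse
termination_by l.length
decreasing_by simp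

-- helper used only by the proofs: sequential non-decreasing check with a carried previous value
def chk : Int → List Int → Bool
  | _, [] => true
  | p, c :: r => if c < p then false else chk c r

theorem length_interleave (l : List Int) : (interleave l).length = l.length := by
  match l with
  | [] => rw [interleave]
  | x :: r =>
    rw [interleave]
    simp [length_interleave r.reverse]
termination_by l.length
decreasing_by simp

theorem getElem?_interleave (l : List Int) (i : Nat) (hi : i < l.length) :
    (interleave l)[i]? = if i % 2 = 0 then l[i / 2]? else l[l.length - 1 - i / 2]? := by
  match l, i with
  | [], _ => simp at hi
  | x :: r, 0 => rw [interleave]; simp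
  | x :: r, Nat.succ j =>
    have hj : j < r.reverse.length := by simp at hi ⊢; omega
    have ih := getElem?_interleave r.reverse j hj
    rw [interleave]
    simp only [List.getElem?_cons_succ, ih]
    simp only [List.length_reverse] at *
    rcases Nat.even_or_odd j with he | ho
    · have h2 : j % 2 = 0 := Nat.even_iff.mp he
      have h2' : (j + 1) % 2 = 1 := by omega
      have hd : (j + 1) / 2 = j / 2 := by omega
      rw [if_pos h2, h2', if_neg (by omega : ¬ (1 = 0)), hd]
      rw [List.getElem?_reverse (by omega)]
      have h1 : (x :: r).length - 1 - j / 2 = (r.length - 1 - j / 2) + 1 := by simp; omega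
      rw [h1, List.getElem?_cons_succ]
    · have h2 : j % 2 = 1 := Nat.odd_iff.mp ho
      have h2' : (j + 1) % 2 = 0 := by omega
      have hd : (j + 1) / 2 = j / 2 + 1 := by omega
      rw [if_neg (by omega : ¬ (j % 2 = 0)), if_pos h2', hd]
      rw [List.getElem?_reverse (by omega)]
      rw [show r.length - 1 - (r.length - 1 - j / 2) = j / 2 by omega]
      rw [← List.getElem?_cons_succ (a := x)]
termination_by l.length
decreasing_by simp

theorem altLoop_eq_chk (a : List Int) (i : Nat) (prev : Int) (h1 : 1 ≤ i) :
    altLoop a a.length i prev = chk prev ((interleave a).drop i) := by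
  by_cases h : i < a.length
  · have hlen : (interleave a).length = a.length := length_interleave a
    have hdrop : (interleave a).drop i = (interleave a)[i]'(by omega) :: (interleave a).drop (i + 1) := by
      rw [List.drop_eq_getElem_cons (by omega)]
    have hget : (interleave a)[i]? =
        if i % 2 = 0 then a[i / 2]? else a[a.length - 1 - i / 2]? := getElem?_interleave a i h
    have hcur : (if i % 2 = 0 then (PySem.List.pyGet? a ((i / 2 : Nat) : Int)).getD 0
               else (PySem.List.pyGet? a (-1 - ((i / 2 : Nat) : Int))).getD 0)
               = (interleave a)[i]'(by omega) := by
      have hd2 : i / 2 < a.length := by omega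
      rcases Nat.decEq (i % 2) 0 with h2 | h2
      · have hk : (-1 - ((i / 2 : Nat) : Int)) = -(((i / 2 + 1 : Nat)) : Int) := by push_cast; ring
        rw [if_neg h2, hk, PySem.List.pyGet?_neg_natCast a (i / 2 + 1) (by omega) (by omega)]
        have heq : (interleave a)[i]? = a[a.length - (i / 2 + 1)]? := by
          rw [hget, if_neg h2, show a.length - 1 - i / 2 = a.length - (i / 2 + 1) by omega]
        rw [← heq, List.getElem?_eq_getElem (by omega)]
        rfl
      · rw [if_pos h2, PySem.List.pyGet?_natCast]
        have heq : (interleave a)[i]? = a[i / 2]? := by rw [hget, if_pos h2]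
        rw [← heq, List.getElem?_eq_getElem (by omega)]
        rfl
    rw [altLoop, dif_pos h, hdrop, chk]
    simp only [hcur]
    by_cases hlt : (interleave a)[i]'(by omega) < prev
    · rw [if_pos hlt, if_pos hlt]
    · rw [if_neg hlt, if_neg hlt]
      exact altLoop_eq_chk a (i + 1) _ (by omega)
  · rw [altLoop, dif_neg h]
    rw [List.drop_eq_nil_of_le (by rw [length_interleave]; omega)]
    rfl
termination_by a.length - i

theorem build_eq (a : List Int) (lo hi : Int) (front : Bool) (hlo : 0 ≤ lo) (hhi : hi < (a.length : Int)) :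
    build a lo hi front =
      (if front then interleave ((a.drop lo.toNat).take (hi + 1 - lo).toNat)
       else interleave ((a.drop lo.toNat).take (hi + 1 - lo).toNat).reverse) := by
  by_cases h : lo ≤ hi
  · have hlt : lo.toNat < a.length := by omega
    have hht : hi.toNat < a.length := by omega
    have hdropc : a.drop lo.toNat = a[lo.toNat] :: a.drop (lo.toNat + 1) :=
      List.drop_eq_getElem_cons hlt
    cases front with
    | true =>
      rw [build, dif_pos h, if_pos rfl]
      have ih := build_eq a (lo + 1) hi false (by omega) hhi
      rw [if_neg (by simp)] at ih
      rw [ih]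
      have hget : (PySem.List.pyGet? a lo).getD 0 = a[lo.toNat] := by
        rw [PySem.List.pyGet?_of_nonneg a hlo, List.getElem?_eq_getElem hlt]; rfl
      have htk : (a.drop lo.toNat).take (hi + 1 - lo).toNat
          = a[lo.toNat] :: (a.drop ((lo + 1).toNat)).take (hi + 1 - (lo + 1)).toNat := by
        rw [hdropc, show (hi + 1 - lo).toNat = (hi + 1 - (lo + 1)).toNat + 1 by omega,
            List.take_succ_cons, show (lo + 1).toNat = lo.toNat + 1 by omega]
      rw [htk, interleave, hget]
      rfl
    | false =>
      rw [build, dif_pos h, if_neg (by simp)]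
      have ih := build_eq a lo (hi - 1) true hlo (by omega)
      rw [if_pos rfl] at ih
      rw [ih]
      have hget : (PySem.List.pyGet? a hi).getD 0 = a[hi.toNat] := by
        rw [PySem.List.pyGet?_of_nonneg a (by omega : (0:Int) ≤ hi), List.getElem?_eq_getElem hht]; rfl
      have hsplit : (a.drop lo.toNat).take (hi + 1 - lo).toNat
          = (a.drop lo.toNat).take (hi - 1 + 1 - lo).toNat ++ [a[hi.toNat]] := by
        rw [show (hi + 1 - lo).toNat = (hi - 1 + 1 - lo).toNat + 1 by omega, List.take_add_one]
        congr 1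
        rw [List.getElem?_drop, List.getElem?_eq_getElem (by omega)]
        simp only [Option.toList_some]
        congr 2
        omega
      simp only [Bool.false_eq_true, if_false]
      rw [hsplit]
      simp only [List.reverse_append, List.reverse_singleton, List.singleton_append]
      rw [interleave, List.reverse_reverse, hget]
  · rw [build, dif_neg h, show (hi + 1 - lo).toNat = 0 by omega, List.take_zero]
    cases front <;> simp [interleave]
termination_by (hi + 1 - lo).toNat
decreasing_by all_goals omega

theorem build_all : ∀ (a : List Int), build a 0 ((a.length : Int) - 1) true = interleave a := by
  intro a
  rw [build_eq a 0 ((a.length : Int) - 1) true le_rfl (by omega), if_pos rfl]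
  simp

theorem zip_all_eq_chk (b : List Int) :
    ((b.zip b.tail).all (fun p => !(p.2 < p.1))) =
      (match b with | [] => true | x :: r => chk x r) := by
  match b with
  | [] => rfl
  | [x] => rfl
  | x :: y :: r =>
    have ih := zip_all_eq_chk (y :: r)
    simp only [List.tail_cons, List.zip_cons_cons, List.all_cons] at *
    rw [ih, chk]
    by_cases h : y < x
    · simp [h]
    · simp [h]

theorem alternatingSort_eq (a : List Int) : alternatingSort a = alternatingSort_alt a := by
  match a with
  | [] => simp [alternatingSort, alternatingSort_alt, build]
  | x :: r =>
    rw [alternatingSort, if_neg (by simp), alternatingSort_alt]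
    simp only [PySem.List.pyGet?_zero_cons, Option.getD_some]
    rw [altLoop_eq_chk (x :: r) 1 x (by omega)]
    rw [build_all, zip_all_eq_chk]
    rw [show interleave (x :: r) = x :: interleave r.reverse from by rw [interleave]]
    rfl

-- ===== VERDICT (by name: the statement is the Claim_ definition above) =====
theorem alternatingSort_spec : Claim_equal_alternatingSort := by
  intro a _
  unfold Spec_alternatingSort
  exact alternatingSort_eq a
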